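-- pv_equiv track=rewrite | github.com/gonggorithm/algorithmStudy | 0702/dan-1388.py | check_in_row
-- ===== SOURCE A (Python) =====
-- def check_in_row(a, n, m):
--     row_cnt = 0
--     link = 0
--
--     for i in range(n):
--         for j in range(m):
--             if a[i][j] == "-":
--                 link = 1
--                 if j == m - 1:
--                     row_cnt += 1
--                     link = 0
--             else:
--                 if link == 1:
--                     row_cnt += 1
--                     link = 0
--
--     return row_cnt
-- ===== SOURCE B (Python) =====
-- def check_in_row(a, n, m):
--     # Counting identity: each maximal run of k dashes contributes k cells and
--     # k-1 adjacent dash pairs, so (#dash cells) - (#adjacent dash pairs) = #runs.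
--     dashes = sum(1 for i in range(n) for j in range(m)
--                    if a[i][j] == "-")
--     pairs = sum(1 for i in range(n) for j in range(m)
--                   if j > 0 and a[i][j] == "-" and a[i][j - 1] == "-")
--     return dashes - pairs
-- ===== Notes on version B (the rewrite author's own statement) =====
-- stated objective: alternative
-- what changed: B replaces A's stateful link-flag scan by a counting identity: it counts dash cells and horizontally adjacent dash pairs in two staged passes and returns their difference (a run of k dashes has k cells and k-1 adjacent pairs, so the difference counts maximal runs); no run-boundary state is maintained.
import Mathlib
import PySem

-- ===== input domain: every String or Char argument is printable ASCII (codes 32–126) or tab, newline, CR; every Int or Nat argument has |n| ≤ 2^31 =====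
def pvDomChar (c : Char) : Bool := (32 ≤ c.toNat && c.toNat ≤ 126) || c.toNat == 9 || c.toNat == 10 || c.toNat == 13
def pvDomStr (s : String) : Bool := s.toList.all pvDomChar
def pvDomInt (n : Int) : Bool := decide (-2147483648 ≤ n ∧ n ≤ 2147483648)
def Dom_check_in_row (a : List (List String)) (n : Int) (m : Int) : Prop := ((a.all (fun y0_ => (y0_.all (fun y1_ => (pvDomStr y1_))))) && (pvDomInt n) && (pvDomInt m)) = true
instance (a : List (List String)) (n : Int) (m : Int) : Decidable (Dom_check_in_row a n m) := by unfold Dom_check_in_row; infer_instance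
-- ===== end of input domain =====

-- B replaces A's stateful link-flag scan by a counting identity (runs = dash cells
-- minus adjacent dash pairs), two staged counts and a subtraction; same value.

-- ===== PORT A =====
-- a[i][j] (in range under Pre_; out of range Python raises, excluded by Pre_)
def pvCell (a : List (List String)) (i j : Int) : String :=
  PySem.List.pyGetD (PySem.List.pyGetD a i []) j ""

def check_in_row (a : List (List String)) (n : Int) (m : Int) : Int :=
  ((PySem.List.pyRange 0 n 1).foldl
    (fun (st : Int × Int) i =>
      (PySem.List.pyRange 0 m 1).foldl
        (fun (st : Int × Int) j =>
          if pvCell a i j = "-" then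
            if j = m - 1 then (st.1 + 1, 0) else (st.1, 1)
          else
            if st.2 = 1 then (st.1 + 1, 0) else st)
        st)
    ((0 : Int), (0 : Int))).1

-- ===== PORT B =====
def check_in_row_alt (a : List (List String)) (n : Int) (m : Int) : Int :=
  let dashes : Int :=
    (((PySem.List.pyRange 0 n 1).flatMap
      (fun i => (PySem.List.pyRange 0 m 1).filter
        (fun j => pvCell a i j == "-"))).length : Int)
  let pairs : Int :=
    (((PySem.List.pyRange 0 n 1).flatMap
      (fun i => (PySem.List.pyRange 0 m 1).filter
        (fun j => decide (0 < j) && (pvCell a i j == "-") && (pvCell a i (j - 1) == "-")))).length : Int)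
  dashes - pairs

-- ===== PRECONDITION & SPEC =====
-- Pre_ excludes exactly the inputs where Python A raises IndexError: when m > 0 the cell
-- accesses need the first n rows to exist and each of them to have at least m cells
-- (with m <= 0 the inner loop is empty and nothing is accessed).
def Pre_check_in_row (a : List (List String)) (n : Int) (m : Int) : Prop :=
  0 < m → (n ≤ (a.length : Int) ∧ ∀ r ∈ a.take n.toNat, m ≤ (r.length : Int))
instance (a : List (List String)) (n : Int) (m : Int) : Decidable (Pre_check_in_row a n m) := by
  unfold Pre_check_in_row; infer_instance

def pvWitness_check_in_row : List (List String) × Int × Int :=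
  ([["-", "x", "-"], ["-", "-", "-"]], 2, 3)

def Spec_check_in_row (a : List (List String)) (n : Int) (m : Int) (out : Int) : Prop := out = check_in_row_alt a n m
instance (a : List (List String)) (n : Int) (m : Int) (out : Int) : Decidable (Spec_check_in_row a n m out) := by unfold Spec_check_in_row; infer_instance

-- ===== CLAIM (what is proved, stated in full; the proofs are below) =====
def Claim_equal_check_in_row : Prop := ∀ (a : List (List String)) (n : Int) (m : Int), Dom_check_in_row a n m → Pre_check_in_row a n m → Spec_check_in_row a n m (check_in_row a n m)

-- ===== LEMMAS AND PROOFS =====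

-- run-start predicate: A's scan counts exactly these positions (one per maximal run)
def pvStart (a : List (List String)) (i j : Int) : Bool :=
  pvCell a i j == "-" && (j == 0 || pvCell a i (j - 1) != "-")

-- link flag A maintains while scanning row i: 1 exactly when the previous cell (s-1) exists,
-- is a dash, and the row is not finished.
def pvLink (a : List (List String)) (m i s : Int) : Int :=
  if 0 < s ∧ s < m ∧ pvCell a i (s - 1) = "-" then 1 else 0

lemma inner_loop (a : List (List String)) (m i : Int) :
    ∀ (k : Nat) (s c : Int), 0 ≤ s → s ≤ m → (m - s).toNat = k →
      (PySem.List.pyRange s m 1).foldl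
        (fun (st : Int × Int) j =>
          if pvCell a i j = "-" then
            if j = m - 1 then (st.1 + 1, 0) else (st.1, 1)
          else
            if st.2 = 1 then (st.1 + 1, 0) else st)
        (c, pvLink a m i s)
      = (c + (((PySem.List.pyRange s m 1).filter (pvStart a i)).length : Int)
          + pvLink a m i s, 0) := by
  intro k
  induction k with
  | zero =>
      intro s c h0 hsm hk
      have hms : m ≤ s := by omega
      rw [PySem.List.pyRange_one_eq_nil hms]
      have hL : pvLink a m i s = 0 := by
        unfold pvLink; rw [if_neg]; omega
      simp [hL]
  | succ k ih =>
      intro s c h0 hsm hk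
      have hs : s < m := by omega
      rw [PySem.List.pyRange_one_cons hs]
      simp only [List.foldl_cons, List.filter_cons]
      by_cases hd : pvCell a i s = "-"
      · by_cases hl : s = m - 1
        · -- last cell of the row, dash: count the run and reset
          have hmeq : s + 1 = m := by omega
          rw [if_pos hd, if_pos hl]
          rw [hmeq, PySem.List.pyRange_one_eq_nil le_rfl]
          simp only [List.foldl_nil, List.filter_nil]
          rcases eq_or_ne s 0 with h0' | h0'
          · subst h0'; simp [pvStart, pvLink, hd]
          · by_cases hd' : pvCell a i (s - 1) = "-"
            · have hLs : pvLink a m i s = 1 := by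
                unfold pvLink; rw [if_pos ⟨by omega, hs, hd'⟩]
              simp [pvStart, hd, hd', h0', hLs]
            · have hLs : pvLink a m i s = 0 := by
                unfold pvLink; rw [if_neg (by intro h; exact hd' h.2.2)]
              simp [pvStart, hd, hd', h0', hLs]
        · -- dash, not last: set the link, count nothing yet
          rw [if_pos hd, if_neg hl]
          have hL1 : pvLink a m i (s + 1) = 1 := by
            unfold pvLink
            rw [if_pos ⟨by omega, by omega, by rw [show s + 1 - 1 = s by ring]; exact hd⟩]
          rw [show ((c, pvLink a m i s).1, (1 : Int)) = (c, pvLink a m i (s + 1)) from by rw [hL1]]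
          rw [ih (s + 1) c (by omega) (by omega) (by omega), hL1]
          rcases eq_or_ne s 0 with h0' | h0'
          · subst h0'
            have hLs : pvLink a m i 0 = 0 := by
              unfold pvLink; rw [if_neg]; omega
            simp [pvStart, hd, hLs]
            try push_cast
            try ring
          · by_cases hd' : pvCell a i (s - 1) = "-"
            · have hLs : pvLink a m i s = 1 := by
                unfold pvLink; rw [if_pos ⟨by omega, hs, hd'⟩]
              simp [pvStart, hd, hd', h0', hLs]
              try push_cast
              try ring
            · have hLs : pvLink a m i s = 0 := by
                unfold pvLink; rw [if_neg (by intro h; exact hd' h.2.2)]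
              simp [pvStart, hd, hd', h0', hLs]
              try push_cast
              try ring
      · -- not a dash: close a pending run iff the link is set
        rw [if_neg hd]
        have hL0 : pvLink a m i (s + 1) = 0 := by
          unfold pvLink
          rw [if_neg (by intro h; exact hd (by rw [show s + 1 - 1 = s by ring] at h; exact h.2.2))]
        have hnostart : pvStart a i s = false := by
          simp [pvStart, hd]
        by_cases hP : 0 < s ∧ s < m ∧ pvCell a i (s - 1) = "-"
        · have hLs : pvLink a m i s = 1 := by unfold pvLink; rw [if_pos hP]
          rw [hLs]
          rw [if_pos (show ((c, (1 : Int)) : Int × Int).2 = 1 from rfl)]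
          rw [show ((c, (1 : Int)).1 + 1, (0 : Int)) = (c + 1, pvLink a m i (s + 1)) from by rw [hL0]]
          rw [ih (s + 1) (c + 1) (by omega) (by omega) (by omega), hL0]
          simp [hnostart]
          try push_cast
          try ring
        · have hLs : pvLink a m i s = 0 := by unfold pvLink; rw [if_neg hP]
          rw [hLs]
          rw [if_neg (show ¬ ((c, (0 : Int)) : Int × Int).2 = 1 from by norm_num)]
          rw [show ((c, (0 : Int)) : Int × Int) = (c, pvLink a m i (s + 1)) from by rw [hL0]]
          rw [ih (s + 1) c (by omega) (by omega) (by omega), hL0]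
          simp [hnostart]

-- one whole row, starting with the link clear (also covers m < 0, empty inner range)
lemma inner0 (a : List (List String)) (m i c : Int) :
    (PySem.List.pyRange 0 m 1).foldl
      (fun (st : Int × Int) j =>
        if pvCell a i j = "-" then
          if j = m - 1 then (st.1 + 1, 0) else (st.1, 1)
        else
          if st.2 = 1 then (st.1 + 1, 0) else st)
      (c, 0)
    = (c + (((PySem.List.pyRange 0 m 1).filter (pvStart a i)).length : Int), 0) := by
  have hL : pvLink a m i 0 = 0 := by
    unfold pvLink; rw [if_neg]; omega
  by_cases hm : 0 ≤ m
  · have h := inner_loop a m i (m - 0).toNat 0 c le_rfl hm rfl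
    rw [hL] at h
    simpa using h
  · rw [PySem.List.pyRange_one_eq_nil (by omega : m ≤ 0)]
    simp

-- outer loop over the rows: A computes the total number of run starts
lemma outer_loop (a : List (List String)) (n m : Int) :
    ∀ (k : Nat) (t c : Int), 0 ≤ t → (n - t).toNat = k →
      (PySem.List.pyRange t n 1).foldl
        (fun (st : Int × Int) i =>
          (PySem.List.pyRange 0 m 1).foldl
            (fun (st : Int × Int) j =>
              if pvCell a i j = "-" then
                if j = m - 1 then (st.1 + 1, 0) else (st.1, 1)
              else
                if st.2 = 1 then (st.1 + 1, 0) else st)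
            st)
        (c, 0)
      = (c + (((PySem.List.pyRange t n 1).flatMap
            (fun i => (PySem.List.pyRange 0 m 1).filter (pvStart a i))).length : Int),
         0) := by
  intro k
  induction k with
  | zero =>
      intro t c h0 hk
      rw [PySem.List.pyRange_one_eq_nil (show n ≤ t by omega)]
      simp
  | succ k ih =>
      intro t c h0 hk
      have ht : t < n := by omega
      rw [PySem.List.pyRange_one_cons ht]
      simp only [List.foldl_cons, List.flatMap_cons, List.length_append]
      rw [inner0 a m t c]
      have hk' : (n - (t + 1)).toNat = k := by omega
      rw [ih (t + 1) _ (by omega) hk']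
      push_cast
      ring_nf

-- counting identity on one list: if q = p || r pointwise and p, r are disjoint, then
-- the q-count splits into the p-count plus the r-count
lemma filter_split (l : List Int) (p q r : Int → Bool)
    (h : ∀ j ∈ l, q j = (p j || r j) ∧ ¬(p j = true ∧ r j = true)) :
    (l.filter q).length = (l.filter p).length + (l.filter r).length := by
  induction l with
  | nil => simp
  | cons x xs ih =>
      simp only [List.filter_cons]
      obtain ⟨hq, hdis⟩ := h x (List.mem_cons_self ..)
      have ih := ih (fun j hj => h j (List.mem_cons_of_mem _ hj))
      cases hp : p x <;> cases hr : r x <;>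
        simp_all <;> omega
  
-- per cell: being a dash = being a run start XOR being the right cell of a dash pair
lemma dash_split (a : List (List String)) (i m : Int) :
    ((PySem.List.pyRange 0 m 1).filter (fun j => pvCell a i j == "-")).length
      = ((PySem.List.pyRange 0 m 1).filter (pvStart a i)).length
        + ((PySem.List.pyRange 0 m 1).filter (fun j => decide (0 < j) && (pvCell a i j == "-") && (pvCell a i (j - 1) == "-"))).length := by
  apply filter_split
  intro j hj
  have hj0 : 0 ≤ j := by
    by_cases hm : 0 < m
    · exact (PySem.List.mem_pyRange_one.mp hj).1
    · rw [PySem.List.pyRange_one_eq_nil (by omega)] at hj; cases hj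
  obtain rfl | hpos : j = 0 ∨ 0 < j := by omega
  · cases hb1 : (pvCell a i 0 == "-") <;> simp [pvStart, hb1]
  · have h1 : (decide (0 < j)) = true := decide_eq_true hpos
    have h2 : (j == 0) = false := by simp; omega
    cases hb1 : (pvCell a i j == "-") <;>
      cases hb2 : (pvCell a i (j - 1) == "-") <;>
        simp [pvStart, bne, hb1, hb2, h1, h2]

-- ===== VERDICT (by name: the statement is the Claim_ definition above) =====
theorem check_in_row_spec : Claim_equal_check_in_row := by
  intro a n m _hdom _hpre
  unfold Spec_check_in_row check_in_row check_in_row_alt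
  rw [outer_loop a n m n.toNat 0 0 le_rfl (by omega)]
  simp only [List.length_flatMap]
  have hrow : ∀ i : Int,
      ((PySem.List.pyRange 0 m 1).filter (fun j => pvCell a i j == "-")).length
        = ((PySem.List.pyRange 0 m 1).filter (pvStart a i)).length
          + ((PySem.List.pyRange 0 m 1).filter
              (fun j => decide (0 < j) && (pvCell a i j == "-") && (pvCell a i (j - 1) == "-"))).length :=
    fun i => dash_split a i m
  simp only [hrow]
  push_cast
  simp only [List.map_map, Function.comp_def, Nat.cast_add]
  rw [PySem.List.sum_map_add_int]
  ring
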